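-- pv_equiv track=rewrite | github.com/mcp-tool-shop-org/code-batch | src/codebatch/paths.py | detect_case_collision
-- ===== SOURCE A (Python) =====
-- from typing import Tuple
--
-- def compute_path_key(path: str) -> str:
--     """Compute a normalized path key for comparison.
--
--     The path_key is lowercase with normalized separators,
--     used for case-insensitive comparisons and collision detection.
--
--     Args:
--         path: Canonicalized path.
--
--     Returns:
--         Lowercase path key.
--     """
--     # Path should already be canonicalized (/ separators, no . or ..)
--     return path.lower()
--
-- def detect_case_collision(paths: list[str]) -> list[Tuple[str, str]]:
--     """Detect case collisions in a list of paths.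
--
--     Args:
--         paths: List of canonicalized paths.
--
--     Returns:
--         List of colliding path pairs.
--     """
--     key_to_paths: dict[str, list[str]] = {}
--
--     for path in paths:
--         key = compute_path_key(path)
--         if key not in key_to_paths:
--             key_to_paths[key] = []
--         key_to_paths[key].append(path)
--
--     collisions = []
--     for key, path_list in key_to_paths.items():
--         if len(path_list) > 1:
--             # Return all pairs
--             for i, p1 in enumerate(path_list):
--                 for p2 in path_list[i + 1:]:
--                     collisions.append((p1, p2))
--
--     return collisions
-- ===== SOURCE B (Python) =====
-- def _pairs(group):
--     out = []
--     rest = group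
--     while rest:
--         first, rest = rest[0], rest[1:]
--         out += [(first, p2) for p2 in rest]
--     return out
--
--
-- def detect_case_collision(paths):
--     seen = set()
--     collisions = []
--     for path in paths:
--         key = path.lower()
--         if key in seen:
--             continue
--         seen.add(key)
--         group = [p for p in paths if p.lower() == key]
--         if len(group) > 1:
--             collisions += _pairs(group)
--     return collisions
-- ===== Notes on version B (the rewrite author's own statement) =====
-- stated objective: alternative
-- what changed: Replaces A's dict-of-groups build plus items/enumerate/slice pair loops by a seen-set of lowercase keys with a full rescan of the input per first-seen key and a recursive pair generator, preserving key first-appearance order and within-group order.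
import Mathlib
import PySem

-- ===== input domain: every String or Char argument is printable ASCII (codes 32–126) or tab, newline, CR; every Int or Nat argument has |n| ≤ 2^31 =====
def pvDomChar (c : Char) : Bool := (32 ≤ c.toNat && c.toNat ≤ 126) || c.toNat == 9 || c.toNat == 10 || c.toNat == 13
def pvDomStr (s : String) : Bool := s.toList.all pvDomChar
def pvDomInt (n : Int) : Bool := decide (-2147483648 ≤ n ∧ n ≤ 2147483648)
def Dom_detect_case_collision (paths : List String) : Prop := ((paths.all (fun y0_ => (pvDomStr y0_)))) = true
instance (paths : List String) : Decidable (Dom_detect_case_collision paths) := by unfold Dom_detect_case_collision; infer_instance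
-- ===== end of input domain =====

-- B replaces A's dict-grouping pass by a seen-set with per-key rescans of the input list (alternative decomposition, no dict).

-- ===== PORT A =====
def compute_path_key (path : String) : String := PySem.Str.lower path

def detect_case_collision (paths : List String) : List (String × String) :=
  let key_to_paths : PySem.Dict String (List String) :=
    paths.foldl (fun d path =>
      let key := compute_path_key path
      let d := if d.contains key = false then d.insert key [] else d
      d.modify key [] (fun l => l ++ [path])) PySem.Dict.empty
  key_to_paths.items.foldl (fun collisions kv =>
    if kv.2.length > 1 then
      (PySem.List.enumerate kv.2 0).foldl (fun collisions ip =>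
        (PySem.List.slice kv.2 (some (ip.1 + 1)) none).foldl
          (fun collisions p2 => collisions ++ [(ip.2, p2)]) collisions) collisions
    else collisions) []

-- ===== PORT B =====
def pairsRec : List String → List (String × String)
  | [] => []
  | first :: rest => rest.map (fun p2 => (first, p2)) ++ pairsRec rest

def detect_case_collision_alt (paths : List String) : List (String × String) :=
  (paths.foldl (fun st path =>
      let key := PySem.Str.lower path
      if PySem.Set.contains st.1 key then st
      else
        let group := paths.filter (fun p => PySem.Str.lower p == key)
        (PySem.Set.add st.1 key,
         if group.length > 1 then st.2 ++ pairsRec group else st.2))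
    ((PySem.Set.empty : PySem.Set String), [])).2

-- ===== PRECONDITION & SPEC =====
def Spec_detect_case_collision (paths : List String) (out : List (String × String)) : Prop := out = detect_case_collision_alt paths
instance (paths : List String) (out : List (String × String)) : Decidable (Spec_detect_case_collision paths out) := by unfold Spec_detect_case_collision; infer_instance

-- ===== CLAIM (what is proved, stated in full; the proofs are below) =====
def Claim_equal_detect_case_collision : Prop := ∀ (paths : List String), Dom_detect_case_collision paths → Spec_detect_case_collision paths (detect_case_collision paths)

-- ===== LEMMAS AND PROOFS =====

-- the group of paths sharing lowercase key k, in original order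
def grp (paths : List String) (k : String) : List String :=
  paths.filter (fun p => PySem.Str.lower p == k)

-- pairs emitted for a list of keys, in key order
def emit (paths : List String) : List String → List (String × String)
  | [] => []
  | k :: ks =>
    (if (grp paths k).length > 1 then pairsRec (grp paths k) else []) ++ emit paths ks

-- A's inner pair loop (enumerate + slice) produces pairsRec
theorem pairsA_aux (g : List String) :
    ∀ (suf : List String) (k : Nat) (acc : List (String × String)), g.drop k = suf →
    (PySem.List.enumerate suf (k : Int)).foldl (fun acc ip =>
        (PySem.List.slice g (some (ip.1 + 1)) none).foldl
          (fun acc p2 => acc ++ [(ip.2, p2)]) acc) acc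
      = acc ++ pairsRec suf := by
  intro suf
  induction suf with
  | nil => intro k acc _; simp [PySem.List.enumerate_nil, pairsRec]
  | cons p suf ih =>
    intro k acc hdrop
    have hd1 : g.drop (k + 1) = suf := by
      have := congrArg (List.drop 1) hdrop
      simpa [List.drop_drop, Nat.add_comm] using this
    rw [PySem.List.enumerate_cons, List.foldl_cons]
    have hslice : PySem.List.slice g (some ((k : Int) + 1)) none = suf := by
      rw [PySem.List.slice_from _ (by omega)]
      have ht : ((k : Int) + 1).toNat = k + 1 := by omega
      rw [ht, hd1]
    rw [hslice, PySem.List.foldl_append_singleton_eq_map]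
    have hk1 : (k : Int) + 1 = ((k + 1 : Nat) : Int) := by push_cast; ring
    rw [hk1, ih (k + 1) _ hd1]
    simp [pairsRec]

-- A's outer loop over the items list equals emit
theorem outerA (paths : List String) :
    ∀ (ks : List String) (acc : List (String × String)),
    ((ks.map (fun k => (k, grp paths k))).foldl (fun collisions kv =>
      if kv.2.length > 1 then
        (PySem.List.enumerate kv.2 0).foldl (fun collisions ip =>
          (PySem.List.slice kv.2 (some (ip.1 + 1)) none).foldl
            (fun collisions p2 => collisions ++ [(ip.2, p2)]) collisions) collisions
      else collisions) acc)
      = acc ++ emit paths ks := by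
  intro ks
  induction ks with
  | nil => intro acc; simp [emit]
  | cons k ks ih =>
    intro acc
    simp only [List.map_cons, List.foldl_cons]
    have hp := pairsA_aux (grp paths k) (grp paths k) 0 acc (by simp)
    simp only [Nat.cast_zero] at hp
    by_cases h : (grp paths k).length > 1
    · rw [if_pos h, hp, ih]
      simp [emit, h]
    · rw [if_neg h, ih]
      simp [emit, h]

-- A as emit over the deduplicated key list
theorem A_eq_emit (paths : List String) :
    detect_case_collision paths
      = emit paths (PySem.Set.ofList (paths.map PySem.Str.lower)) := by
  unfold detect_case_collision
  -- step function: the "if absent insert [] then append" is a single modify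
  have hstep : (fun (d : PySem.Dict String (List String)) (path : String) =>
      let key := compute_path_key path
      let d := if d.contains key = false then d.insert key [] else d
      d.modify key [] (fun l => l ++ [path]))
      = (fun d path => d.modify (PySem.Str.lower path) [] (fun l => l ++ [path])) := by
    funext d path
    simp only [compute_path_key]
    by_cases h : d.contains (PySem.Str.lower path) = false
    · rw [if_pos h]
      simp only [PySem.Dict.modify]
      rw [PySem.Dict.getD_insert_self, PySem.Dict.insert_insert_self]
      rw [PySem.Dict.getD_of_not_contains (h := h)]
    · rw [if_neg h]
  rw [hstep]
  set dA := paths.foldl (fun d path => d.modify (PySem.Str.lower path) [] (fun l => l ++ [path]))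
      PySem.Dict.empty with hdA
  have hkeys : dA.keys = PySem.Set.ofList (paths.map PySem.Str.lower) := by
    rw [hdA]
    rw [PySem.Dict.keys_foldl_modify_key paths (fun p => PySem.Str.lower p) []
      (fun _ p l => l ++ [p]) PySem.Dict.empty]
    rw [PySem.Dict.keys_empty, PySem.Set.update_nil_left]
  have hnd : dA.keys.Nodup := by
    rw [hdA]
    exact PySem.Dict.nodup_keys_foldl_modify_key paths (fun p => PySem.Str.lower p) []
      (fun _ p l => l ++ [p]) PySem.Dict.empty PySem.Dict.nodup_keys_empty
  have hgetD : ∀ k, dA.getD k [] = grp paths k := by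
    intro k
    have hmap := List.foldl_map (f := fun p : String => (PySem.Str.lower p, p))
      (g := fun (d : PySem.Dict String (List String)) (q : String × String) =>
        d.modify q.1 [] (fun l => l ++ [q.2]))
      (l := paths) (init := (PySem.Dict.empty : PySem.Dict String (List String)))
    rw [hdA, ← hmap,
      PySem.Dict.getD_foldl_modify_append (paths.map (fun p => (PySem.Str.lower p, p)))
        PySem.Dict.empty k]
    simp [grp, List.filter_map, Function.comp_def]
  have hitems : dA.items
      = (PySem.Set.ofList (paths.map PySem.Str.lower)).map (fun k => (k, grp paths k)) := by
    rw [PySem.Dict.items_eq_map_keys dA hnd [], hkeys]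
    exact List.map_congr_left (fun k _ => by rw [hgetD k])
  simp only []
  rw [hitems, outerA]
  simp

-- first-appearance new keys, threading the seen set exactly as B does
def firstNew (seen : PySem.Set String) : List String → List String
  | [] => []
  | k :: ks => if PySem.Set.contains seen k then firstNew seen ks else k :: firstNew (seen ++ [k]) ks

theorem update_eq_firstNew (ks : List String) :
    ∀ (seen : PySem.Set String), PySem.Set.update seen ks = seen ++ firstNew seen ks := by
  induction ks with
  | nil => intro seen; simp [PySem.Set.update_nil, firstNew]
  | cons k ks ih =>
    intro seen
    rw [PySem.Set.update_cons, firstNew]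
    by_cases h : PySem.Set.contains seen k
    · have hm : k ∈ seen := (PySem.Set.contains_iff seen k).mp h
      rw [PySem.Set.add_of_mem hm, ih, if_pos h]
    · have hm : k ∉ seen := fun hk => h ((PySem.Set.contains_iff seen k).mpr hk)
      rw [PySem.Set.add_of_not_mem hm, ih, if_neg h]
      simp

theorem ofList_eq_firstNew (ks : List String) :
    PySem.Set.ofList ks = firstNew PySem.Set.empty ks := by
  have h := update_eq_firstNew ks PySem.Set.empty
  have h2 : PySem.Set.update PySem.Set.empty ks = PySem.Set.ofList ks :=
    PySem.Set.update_nil_left ks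
  rw [h2] at h
  simpa [PySem.Set.empty] using h

-- B's fold, with the seen set and accumulator generalized
theorem B_aux (paths : List String) (l : List String) :
    ∀ (seen : PySem.Set String) (acc : List (String × String)),
    l.foldl (fun st path =>
      let key := PySem.Str.lower path
      if PySem.Set.contains st.1 key then st
      else
        let group := paths.filter (fun p => PySem.Str.lower p == key)
        (PySem.Set.add st.1 key,
         if group.length > 1 then st.2 ++ pairsRec group else st.2)) (seen, acc)
      = (PySem.Set.update seen (l.map PySem.Str.lower),
         acc ++ emit paths (firstNew seen (l.map PySem.Str.lower))) := by
  induction l with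
  | nil => intro seen acc; simp [firstNew, emit, PySem.Set.update_nil]
  | cons p l ih =>
    intro seen acc
    rw [List.foldl_cons, List.map_cons, PySem.Set.update_cons, firstNew]
    by_cases h : PySem.Set.contains seen (PySem.Str.lower p)
    · have hm : PySem.Str.lower p ∈ seen := (PySem.Set.contains_iff _ _).mp h
      simp only [h, if_pos]
      rw [ih, PySem.Set.add_of_mem hm]
    · have hm : PySem.Str.lower p ∉ seen := fun hk => h ((PySem.Set.contains_iff _ _).mpr hk)
      simp only [h, if_false, Bool.false_eq_true]
      rw [ih, PySem.Set.add_of_not_mem hm]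
      by_cases hg : (paths.filter (fun q => PySem.Str.lower q == PySem.Str.lower p)).length > 1
      · simp [emit, grp, hg]
      · simp [emit, grp, hg]

theorem B_eq_emit (paths : List String) :
    detect_case_collision_alt paths
      = emit paths (PySem.Set.ofList (paths.map PySem.Str.lower)) := by
  unfold detect_case_collision_alt
  rw [B_aux paths paths PySem.Set.empty []]
  rw [ofList_eq_firstNew]
  simp

-- ===== VERDICT (by name: the statement is the Claim_ definition above) =====
theorem detect_case_collision_spec : Claim_equal_detect_case_collision := by
  intro paths _
  unfold Spec_detect_case_collision
  rw [A_eq_emit, B_eq_emit]
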